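-- pv_equiv track=rewrite | github.com/Huang-Yidian/NER-FlatLattice | HttpServer.py | _bmeso_tag_to_spans
-- ===== SOURCE A (Python) =====
-- def _bmeso_tag_to_spans(tags, ignore_labels=None):
--
--     ignore_labels = set(ignore_labels) if ignore_labels else set()
--
--     spans = []
--     prev_bmes_tag = None
--     for idx, tag in enumerate(tags):
--         tag = tag.lower()
--         bmes_tag, label = tag[:1], tag[2:]
--         if bmes_tag in ('b', 's'):
--             spans.append((label, [idx, idx]))
--         elif bmes_tag in ('m', 'e') and prev_bmes_tag in ('b', 'm') and label == spans[-1][0]: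
--             spans[-1][1][1] = idx
--         elif bmes_tag == 'o':
--             pass
--         else:
--             spans.append((label, [idx, idx]))
--         prev_bmes_tag = bmes_tag
--     return [(span[0], (span[1][0], span[1][1] + 1))
--             for span in spans
--             if span[0] not in ignore_labels
--             ]
-- ===== SOURCE B (Python) =====
-- def _bmeso_tag_to_spans(tags, ignore_labels=None):
--     ignore = frozenset(ignore_labels or ())
--     # Pass 1: classify each position locally from (tag, previous tag) only.
--     events = []
--     prev = None  # (bmes, label) of the previous tag, or None
--     for tag in tags:
--         t = tag.lower()
--         b, lab = t[:1], t[2:]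
--         if b in ('b', 's'):
--             kind = 'open'
--         elif b in ('m', 'e') and prev is not None and prev[0] in ('b', 'm') and lab == prev[1]:
--             kind = 'ext'
--         elif b == 'o':
--             kind = 'skip'
--         else:
--             kind = 'open'
--         events.append((kind, lab))
--         prev = (b, lab)
--     # Pass 2: each 'open' starts a span; its end is the last of the run of
--     # consecutive 'ext' events that follows.
--     out = []
--     for idx, (kind, lab) in enumerate(events):
--         if kind == 'open' and lab not in ignore:
--             end = idx
--             j = idx + 1
--             while j < len(events) and events[j][0] == 'ext':
--                 end = j
--                 j += 1
--             out.append((lab, (idx, end + 1)))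
--     return out
-- ===== Notes on version B (the rewrite author's own statement) =====
-- stated objective: alternative
-- what changed: B replaces A's single pass that mutates the last span in the growing result list by a two-phase algorithm: phase 1 classifies every position locally as open/ext/skip using only the current and previous tag (no access to the span list), phase 2 emits one span per 'open' by scanning forward over the following run of 'ext' events.
import Mathlib
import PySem

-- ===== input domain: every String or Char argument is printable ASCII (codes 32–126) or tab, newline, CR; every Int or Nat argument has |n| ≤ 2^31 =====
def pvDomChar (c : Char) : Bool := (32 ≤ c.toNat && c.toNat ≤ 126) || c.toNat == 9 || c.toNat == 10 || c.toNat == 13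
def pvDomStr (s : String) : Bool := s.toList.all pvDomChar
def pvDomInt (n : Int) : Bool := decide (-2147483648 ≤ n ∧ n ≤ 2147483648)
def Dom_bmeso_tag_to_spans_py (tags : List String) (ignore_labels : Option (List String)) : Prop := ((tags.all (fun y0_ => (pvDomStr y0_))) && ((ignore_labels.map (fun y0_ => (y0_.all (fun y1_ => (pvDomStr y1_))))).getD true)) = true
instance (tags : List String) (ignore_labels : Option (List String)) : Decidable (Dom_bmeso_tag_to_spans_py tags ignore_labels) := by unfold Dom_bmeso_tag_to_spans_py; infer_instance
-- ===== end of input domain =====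

-- B recomputes the spans by a two-phase algorithm (local classification of every position,
-- then one forward scan per opened span) instead of A's single pass that mutates the last
-- span of the growing result list; same cost, different structure (objective: alternative).

-- tag.lower(); bmes_tag, label = tag[:1], tag[2:]  (this line is identical in both Pythons)
def pvSplitTag (tag : String) : String × String :=
  let t := PySem.Str.lower tag
  (PySem.Str.slice t none (some 1), PySem.Str.slice t (some 2) none)
-- ===== PORT A =====
-- the for loop of A; spans[-1] is read through the total pyGetD with a default that is
-- never consulted: Python reaches spans[-1] only under prev_bmes_tag in ('b','m'), and the
-- loop invariant (see pvMain below) gives spans != [] there, so A raises on no input.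
def pvALoop : List String → Int → List (String × (Int × Int)) → Option String → List (String × (Int × Int))
  | [], _, spans, _ => spans
  | tag :: rest, idx, spans, prev =>
    let bl := pvSplitTag tag
    let b := bl.1
    let lab := bl.2
    if b = "b" ∨ b = "s" then
      pvALoop rest (idx + 1) (spans ++ [(lab, (idx, idx))]) (some b)
    else if (b = "m" ∨ b = "e") ∧ (prev = some "b" ∨ prev = some "m") ∧
            lab = (PySem.List.pyGetD spans (-1) ("", (0, 0))).1 then
      pvALoop rest (idx + 1)
        (spans.dropLast ++ [((PySem.List.pyGetD spans (-1) ("", (0, 0))).1,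
                             ((PySem.List.pyGetD spans (-1) ("", (0, 0))).2.1, idx))]) (some b)
    else if b = "o" then
      pvALoop rest (idx + 1) spans (some b)
    else
      pvALoop rest (idx + 1) (spans ++ [(lab, (idx, idx))]) (some b)
def bmeso_tag_to_spans_py (tags : List String) (ignore_labels : Option (List String)) : List (String × (Int × Int)) :=
  -- ignore_labels = set(ignore_labels) if ignore_labels else set()  (None and [] both give the empty set)
  let ignore : PySem.Set String := PySem.Set.ofList (ignore_labels.getD [])
  let spans := pvALoop tags 0 [] none
  (spans.filter (fun s => !(PySem.Set.contains ignore s.1))).map (fun s => (s.1, (s.2.1, s.2.2 + 1)))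

-- ===== PORT B =====
-- phase 1: classify each position as "open"/"ext"/"skip" from (tag, previous tag) only
def pvBClassify : Option (String × String) → List String → List (String × String)
  | _, [] => []
  | prev, tag :: rest =>
    let bl := pvSplitTag tag
    let b := bl.1
    let lab := bl.2
    let kind :=
      if b = "b" ∨ b = "s" then "open"
      else if (b = "m" ∨ b = "e") ∧ (prev.map Prod.fst = some "b" ∨ prev.map Prod.fst = some "m") ∧
              prev.map Prod.snd = some lab then "ext"
      else if b = "o" then "skip"
      else "open"
    (kind, lab) :: pvBClassify (some (b, lab)) rest
-- the inner while loop of phase 2: length of the leading run of "ext" events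
def pvBRun : List (String × String) → Int
  | [] => 0
  | (k, _) :: r => if k = "ext" then pvBRun r + 1 else 0
-- phase 2: one span per non-ignored "open"; its end comes from the following "ext" run
def pvBEmit (ignore : PySem.Set String) : Int → List (String × String) → List (String × (Int × Int))
  | _, [] => []
  | i, (k, lab) :: rest =>
    if k = "open" ∧ ¬ (PySem.Set.contains ignore lab = true) then
      (lab, (i, i + pvBRun rest + 1)) :: pvBEmit ignore (i + 1) rest
    else pvBEmit ignore (i + 1) rest
def bmeso_tag_to_spans_py_alt (tags : List String) (ignore_labels : Option (List String)) : List (String × (Int × Int)) :=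
  let ignore : PySem.Set String := PySem.Set.ofList (ignore_labels.getD [])
  pvBEmit ignore 0 (pvBClassify none tags)

-- ===== PRECONDITION & SPEC =====
def Spec_bmeso_tag_to_spans_py (tags : List String) (ignore_labels : Option (List String)) (out : List (String × (Int × Int))) : Prop := out = bmeso_tag_to_spans_py_alt tags ignore_labels
instance (tags : List String) (ignore_labels : Option (List String)) (out : List (String × (Int × Int))) : Decidable (Spec_bmeso_tag_to_spans_py tags ignore_labels out) := by unfold Spec_bmeso_tag_to_spans_py; infer_instance

-- ===== CLAIM (what is proved, stated in full; the proofs are below) =====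
def Claim_equal_bmeso_tag_to_spans_py : Prop := ∀ (tags : List String) (ignore_labels : Option (List String)), Dom_bmeso_tag_to_spans_py tags ignore_labels → Spec_bmeso_tag_to_spans_py tags ignore_labels (bmeso_tag_to_spans_py tags ignore_labels)

-- ===== LEMMAS AND PROOFS =====
-- pvPost is A's final list comprehension; pvOptEmit is what the still-extendable span of
-- A's state contributes once its final end j-1 is known.  pvMain is the loop invariant:
-- A's state is done ++ pend.toList (pend = the span a following m/e could still extend,
-- open exactly when the previous bmes tag was 'b' or 'm', its label = that tag's label,
-- its end = idx-1), and processing the remaining tags yields B's phase-2 output.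
def pvPost (ig : PySem.Set String) (xs : List (String × (Int × Int))) : List (String × (Int × Int)) :=
  (xs.filter (fun s => !(PySem.Set.contains ig s.1))).map (fun s => (s.1, (s.2.1, s.2.2 + 1)))
def pvOptEmit (ig : PySem.Set String) (pend : Option (String × (Int × Int))) (j : Int) : List (String × (Int × Int)) :=
  match pend with
  | none => []
  | some p => if PySem.Set.contains ig p.1 then [] else [(p.1, (p.2.1, j))]
lemma pvPost_append (ig : PySem.Set String) (xs ys : List (String × (Int × Int))) :
    pvPost ig (xs ++ ys) = pvPost ig xs ++ pvPost ig ys := by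
  simp [pvPost, List.filter_append]
lemma pvBRun_notbm (b lab : String) (rest : List String) (h : ¬ (b = "b" ∨ b = "m")) :
    pvBRun (pvBClassify (some (b, lab)) rest) = 0 := by
  cases rest with
  | nil => rfl
  | cons tag r =>
    simp only [pvBClassify]
    split_ifs with h1 h2 h3
    · simp only [pvBRun]; rw [if_neg (by decide)]
    · exfalso
      rcases h2 with ⟨-, h2, -⟩
      simp only [Option.map_some, Option.some.injEq] at h2
      exact h h2
    · simp only [pvBRun]; rw [if_neg (by decide)]
    · simp only [pvBRun]; rw [if_neg (by decide)]

lemma pvPost_single (ig : PySem.Set String) (l : String) (s e : Int) :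
    pvPost ig [(l, (s, e))] = if l ∈ ig then [] else [(l, (s, e + 1))] := by
  by_cases hl : l ∈ ig <;> simp [pvPost, hl]

lemma pvPost_pend (ig : PySem.Set String) (pend : Option (String × (Int × Int))) (idx : Int)
    (H : ∀ p, pend = some p → p.2.2 = idx - 1) :
    pvPost ig pend.toList = pvOptEmit ig pend idx := by
  cases pend with
  | none => simp [pvPost, pvOptEmit]
  | some p =>
    rcases p with ⟨l, s, e⟩
    have he := H _ rfl
    simp only at he
    simp only [Option.toList, pvOptEmit, pvPost_single]
    by_cases hl : l ∈ ig <;> simp [hl]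
    omega

lemma pvOpenStep (ig : PySem.Set String) (r : List String)
    (ih : ∀ (idx : Int) (done : List (String × (Int × Int))) (pend : Option (String × (Int × Int)))
      (pb : Option (String × String)),
      (pend.isSome = true ↔ (pb.map Prod.fst = some "b" ∨ pb.map Prod.fst = some "m")) →
      (∀ p, pend = some p → pb.map Prod.snd = some p.1 ∧ p.2.2 = idx - 1) →
      pvPost ig (pvALoop r idx (done ++ pend.toList) (pb.map Prod.fst)) =
        pvPost ig done ++ pvOptEmit ig pend (idx + pvBRun (pvBClassify pb r)) ++
          pvBEmit ig idx (pvBClassify pb r))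
    (idx : Int) (done : List (String × (Int × Int))) (pend : Option (String × (Int × Int)))
    (b lab : String)
    (hpend : pvPost ig pend.toList = pvOptEmit ig pend idx) :
    pvPost ig (pvALoop r (idx + 1) ((done ++ pend.toList) ++ [(lab, (idx, idx))]) (some b)) =
      pvPost ig done ++ pvOptEmit ig pend idx ++
        pvBEmit ig idx (("open", lab) :: pvBClassify (some (b, lab)) r) := by
  by_cases hbm : b = "b" ∨ b = "m"
  · have h := ih (idx + 1) (done ++ pend.toList) (some (lab, (idx, idx))) (some (b, lab))
      (by simpa using hbm) (by intro q hq; cases hq; exact ⟨rfl, by simp⟩)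
    simp only [Option.toList_some, Option.map_some] at h
    rw [h, pvPost_append, hpend]
    simp only [pvBEmit, pvOptEmit, List.append_assoc]
    have harith : idx + pvBRun (pvBClassify (some (b, lab)) r) + 1 =
        idx + 1 + pvBRun (pvBClassify (some (b, lab)) r) := by ring
    by_cases hl : lab ∈ ig <;> simp [hl, harith]
  · have h := ih (idx + 1) ((done ++ pend.toList) ++ [(lab, (idx, idx))]) none (some (b, lab))
      (by simpa using hbm) (by simp)
    simp only [Option.toList_none, Option.map_some, List.append_nil] at h
    rw [h]
    have hrun' : pvBRun (pvBClassify (some (b, lab)) r) = 0 := pvBRun_notbm b lab r hbm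
    rw [pvPost_append, pvPost_append, hpend, pvPost_single]
    simp only [pvBEmit, pvOptEmit, List.append_assoc, hrun']
    by_cases hl : lab ∈ ig <;> simp [hl]

lemma pvMain (ig : PySem.Set String) (rest : List String) :
    ∀ (idx : Int) (done : List (String × (Int × Int))) (pend : Option (String × (Int × Int)))
      (pb : Option (String × String)),
      (pend.isSome = true ↔ (pb.map Prod.fst = some "b" ∨ pb.map Prod.fst = some "m")) →
      (∀ p, pend = some p → pb.map Prod.snd = some p.1 ∧ p.2.2 = idx - 1) →
      pvPost ig (pvALoop rest idx (done ++ pend.toList) (pb.map Prod.fst)) =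
        pvPost ig done ++ pvOptEmit ig pend (idx + pvBRun (pvBClassify pb rest)) ++
          pvBEmit ig idx (pvBClassify pb rest) := by
  induction rest with
  | nil =>
    intro idx done pend pb H1 H2
    cases pend with
    | none => simp [pvALoop, pvBClassify, pvBEmit, pvOptEmit]
    | some p =>
      obtain ⟨-, he⟩ := H2 p rfl
      simp only [pvALoop, pvBClassify, pvBRun, pvBEmit, Option.toList, pvPost_append]
      by_cases hc : p.1 ∈ ig
      · simp [pvPost, pvOptEmit, hc]
      · simp [pvPost, pvOptEmit, hc]
        omega
  | cons tag r ih =>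
    intro idx done pend pb H1 H2
    rcases hsplit : pvSplitTag tag with ⟨b, lab⟩
    simp only [pvALoop, pvBClassify, hsplit]
    have hpend := pvPost_pend ig pend idx (fun p hp => (H2 p hp).2)
    by_cases c1 : b = "b" ∨ b = "s"
    · rw [if_pos c1, if_pos c1]
      have hrun0 : pvBRun (("open", lab) :: pvBClassify (some (b, lab)) r) = 0 := by
        simp only [pvBRun]; rw [if_neg (by decide)]
      rw [hrun0, add_zero]
      exact pvOpenStep ig r ih idx done pend b lab hpend
    · rw [if_neg c1, if_neg c1]
      by_cases c2 : (b = "m" ∨ b = "e") ∧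
          (pb.map Prod.fst = some "b" ∨ pb.map Prod.fst = some "m") ∧
          lab = (PySem.List.pyGetD (done ++ pend.toList) (-1) ("", (0, 0))).1
      · obtain ⟨hme, hprev, hlab⟩ := c2
        obtain ⟨p, rfl⟩ : ∃ p, pend = some p := by
          cases pend with
          | none => simp at H1; exact absurd hprev (by simpa using H1)
          | some p => exact ⟨p, rfl⟩
        obtain ⟨hsnd, he⟩ := H2 p rfl
        have hget : PySem.List.pyGetD (done ++ [p]) (-1) ("", (0, 0)) = p :=
          PySem.List.pyGetD_neg_one_append_singleton done p ("", (0, 0))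
        simp only [Option.toList_some] at hlab hget ⊢
        have hlab' : lab = p.1 := by rw [hlab, hget]
        rw [if_pos ⟨hme, hprev, hlab⟩, if_pos (show (b = "m" ∨ b = "e") ∧
            (pb.map Prod.fst = some "b" ∨ pb.map Prod.fst = some "m") ∧
            pb.map Prod.snd = some lab from ⟨hme, hprev, by rw [hsnd, hlab']⟩)]
        rw [hget, List.dropLast_concat]
        rcases p with ⟨l, s, e⟩
        simp only at hlab hsnd he
        subst hlab'
        by_cases hb : b = "m"
        · have h := ih (idx + 1) done (some (lab, (s, idx))) (some (b, lab))
            (by simp [hb]) (by intro q hq; cases hq; exact ⟨rfl, by simp⟩)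
          simp only [Option.toList_some, Option.map_some] at h
          rw [h]
          have hrun : pvBRun (("ext", lab) :: pvBClassify (some (b, lab)) r) =
              pvBRun (pvBClassify (some (b, lab)) r) + 1 := by
            simp [pvBRun]
          rw [hrun]
          have hskip : pvBEmit ig idx (("ext", lab) :: pvBClassify (some (b, lab)) r) =
              pvBEmit ig (idx + 1) (pvBClassify (some (b, lab)) r) := by
            simp only [pvBEmit]; rw [if_neg (by simp)]
          rw [hskip]
          have harith : idx + 1 + pvBRun (pvBClassify (some (b, lab)) r) =
              idx + (pvBRun (pvBClassify (some (b, lab)) r) + 1) := by ring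
          rw [harith]
          simp [pvOptEmit]
        · have hbe : b = "e" := by rcases hme with h | h; exact absurd h hb; exact h
          have hrun' : pvBRun (pvBClassify (some (b, lab)) r) = 0 :=
            pvBRun_notbm b lab r (by simp [hbe])
          have h := ih (idx + 1) (done ++ [(lab, (s, idx))]) none (some (b, lab))
            (by simp [hbe]) (by simp)
          simp only [Option.toList_none, Option.map_some, List.append_nil] at h
          rw [h]
          have hrun : pvBRun (("ext", lab) :: pvBClassify (some (b, lab)) r) =
              pvBRun (pvBClassify (some (b, lab)) r) + 1 := by
            simp [pvBRun]
          have hskip : pvBEmit ig idx (("ext", lab) :: pvBClassify (some (b, lab)) r) =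
              pvBEmit ig (idx + 1) (pvBClassify (some (b, lab)) r) := by
            simp only [pvBEmit]; rw [if_neg (by simp)]
          rw [hrun, hskip, hrun', pvPost_append, pvPost_single]
          simp only [pvOptEmit, List.append_assoc]
          by_cases hl : lab ∈ ig <;> simp [hl]
      · have cB : ¬((b = "m" ∨ b = "e") ∧
            (pb.map Prod.fst = some "b" ∨ pb.map Prod.fst = some "m") ∧
            pb.map Prod.snd = some lab) := by
          rintro ⟨hme, hprev, hsnd⟩
          obtain ⟨p, rfl⟩ : ∃ p, pend = some p := by
            cases pend with
            | none => simp at H1; exact absurd hprev (by simpa using H1)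
            | some p => exact ⟨p, rfl⟩
          obtain ⟨hsnd', -⟩ := H2 p rfl
          rw [hsnd'] at hsnd
          have hlab : lab = p.1 := by simpa using hsnd.symm
          exact c2 ⟨hme, hprev, by
            simp only [Option.toList]
            rw [PySem.List.pyGetD_neg_one_append_singleton done p ("", (0, 0))]
            exact hlab⟩
        rw [if_neg c2, if_neg cB]
        by_cases c3 : b = "o"
        · rw [if_pos c3, if_pos c3]
          have hrun' : pvBRun (pvBClassify (some (b, lab)) r) = 0 :=
            pvBRun_notbm b lab r (by simp [c3])
          have h := ih (idx + 1) (done ++ pend.toList) none (some (b, lab))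
            (by simp [c3]) (by simp)
          simp only [Option.toList_none, Option.map_some, List.append_nil] at h
          rw [h]
          have hrun : pvBRun (("skip", lab) :: pvBClassify (some (b, lab)) r) = 0 := by
            simp only [pvBRun]; rw [if_neg (by decide)]
          have hskip : pvBEmit ig idx (("skip", lab) :: pvBClassify (some (b, lab)) r) =
              pvBEmit ig (idx + 1) (pvBClassify (some (b, lab)) r) := by
            simp only [pvBEmit]; rw [if_neg (by simp)]
          rw [hrun, hskip, add_zero, pvPost_append, hpend]
          simp [List.append_assoc, pvOptEmit]
        · rw [if_neg c3, if_neg c3]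
          have hrun0 : pvBRun (("open", lab) :: pvBClassify (some (b, lab)) r) = 0 := by
            simp only [pvBRun]; rw [if_neg (by decide)]
          rw [hrun0, add_zero]
          exact pvOpenStep ig r ih idx done pend b lab hpend

-- ===== VERDICT (by name: the statement is the Claim_ definition above) =====
theorem bmeso_tag_to_spans_py_spec : Claim_equal_bmeso_tag_to_spans_py := by
  intro tags ignore_labels _
  unfold Spec_bmeso_tag_to_spans_py bmeso_tag_to_spans_py bmeso_tag_to_spans_py_alt
  have h := pvMain (PySem.Set.ofList (ignore_labels.getD [])) tags 0 [] none none
    (by simp) (by intro p hp; cases hp)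
  simpa [pvPost] using h
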